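-- pv_equiv track=rewrite | github.com/BROJ3/Ergdata_Dash | sworkout_new.py | split_strokes_by_time_reset
-- ===== SOURCE A (Python) =====
-- def split_strokes_by_time_reset(strokes):
--     """
--     Splits stroke list into segments when the Concept2 time counter resets.
--     """
--     t_vals = [s.get("t", 0) for s in strokes]
--
--     boundaries = [0]
--     for i in range(len(t_vals) - 1):
--         if t_vals[i + 1] < t_vals[i]:
--             boundaries.append(i + 1)
--     boundaries.append(len(strokes))
--
--     segments = []
--     for a, b in zip(boundaries[:-1], boundaries[1:]):
--         seg = strokes[a:b]
--         if seg:
--             segments.append(seg)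
--     return segments
-- ===== SOURCE B (Python) =====
-- def split_strokes_by_time_reset(strokes):
--     """
--     Splits stroke list into segments when the Concept2 time counter resets.
--     Single streaming pass: no boundary-index list, no slicing.
--     """
--     segments = []
--     current = []
--     prev = 0
--     for s in strokes:
--         t = s.get("t", 0)
--         if current and t < prev:
--             segments.append(current)
--             current = [s]
--         else:
--             current.append(s)
--         prev = t
--     if current:
--         segments.append(current)
--     return segments
-- ===== Notes on version B (the rewrite author's own statement) =====
-- stated objective: simpler
-- what changed: A first builds a list of boundary indices (scanning adjacent t-values by index) and then slices the stroke list between consecutive boundaries; B is a single streaming pass that grows the current segment and flushes it whenever the t counter drops, building the segments directly with no index list and no slicing.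
import Mathlib
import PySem

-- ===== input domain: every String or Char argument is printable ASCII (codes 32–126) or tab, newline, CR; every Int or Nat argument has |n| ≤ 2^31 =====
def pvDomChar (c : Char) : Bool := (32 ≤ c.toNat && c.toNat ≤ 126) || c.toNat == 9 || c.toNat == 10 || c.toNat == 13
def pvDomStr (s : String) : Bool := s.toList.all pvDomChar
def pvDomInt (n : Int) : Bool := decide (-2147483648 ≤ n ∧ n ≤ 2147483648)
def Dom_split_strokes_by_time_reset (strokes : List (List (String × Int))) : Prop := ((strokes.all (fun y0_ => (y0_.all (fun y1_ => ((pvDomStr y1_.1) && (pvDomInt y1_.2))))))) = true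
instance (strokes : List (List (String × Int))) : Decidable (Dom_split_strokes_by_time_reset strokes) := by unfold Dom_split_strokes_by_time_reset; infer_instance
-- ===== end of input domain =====

-- B replaces A's two-phase algorithm (collect boundary indices, then slice between consecutive
-- boundaries) by a single streaming pass that grows the current segment directly (objective: simpler).

-- ===== PORT A =====
-- Literal port of A. Python reads t_vals[i] / t_vals[i+1] only for i in range(len(t_vals)-1),
-- always in range, so the total pyGetD (exact for in-range indices) is an exact port here.
def split_strokes_by_time_reset (strokes : List (List (String × Int))) : List (List (List (String × Int))) :=
  let t_vals : List Int := strokes.map (fun s => (PySem.Dict.mk s).getD "t" 0)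
  let boundaries : List Int :=
    (PySem.List.pyRange 0 (PySem.List.len t_vals - 1) 1).foldl
      (fun bs i =>
        if PySem.List.pyGetD t_vals (i + 1) 0 < PySem.List.pyGetD t_vals i 0 then bs ++ [i + 1] else bs)
      [0]
  let boundaries := boundaries ++ [PySem.List.len strokes]
  ((PySem.List.slice boundaries none (some (-1))).zip (PySem.List.slice boundaries (some 1) none)).foldl
    (fun segments ab =>
      let seg := PySem.List.slice strokes (some ab.1) (some ab.2)
      if seg ≠ [] then segments ++ [seg] else segments)
    []

-- ===== PORT B =====
-- Literal port of Source B: one foldl whose state is (segments, current, prev), then the final flush.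
def split_strokes_by_time_reset_alt (strokes : List (List (String × Int))) : List (List (List (String × Int))) :=
  let r :=
    strokes.foldl
      (fun (acc : List (List (List (String × Int))) × List (List (String × Int)) × Int) s =>
        let t := (PySem.Dict.mk s).getD "t" 0
        if acc.2.1 ≠ [] ∧ t < acc.2.2 then (acc.1 ++ [acc.2.1], [s], t)
        else (acc.1, acc.2.1 ++ [s], t))
      ([], [], 0)
  if r.2.1 ≠ [] then r.1 ++ [r.2.1] else r.1

-- ===== PRECONDITION & SPEC =====
def Spec_split_strokes_by_time_reset (strokes : List (List (String × Int))) (out : List (List (List (String × Int)))) : Prop := out = split_strokes_by_time_reset_alt strokes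
instance (strokes : List (List (String × Int))) (out : List (List (List (String × Int)))) : Decidable (Spec_split_strokes_by_time_reset strokes out) := by unfold Spec_split_strokes_by_time_reset; infer_instance

-- ===== CLAIM (what is proved, stated in full; the proofs are below) =====
def Claim_equal_split_strokes_by_time_reset : Prop := ∀ (strokes : List (List (String × Int))), Dom_split_strokes_by_time_reset strokes → Spec_split_strokes_by_time_reset strokes (split_strokes_by_time_reset strokes)

-- ===== LEMMAS AND PROOFS =====

-- the "t" value of one stroke dict
def pvT (s : List (String × Int)) : Int := (PySem.Dict.mk s).getD "t" 0

-- (continuation of the current segment, rest starting at the first reset)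
def pvTake1 (prev : Int) : List (List (String × Int)) → List (List (String × Int)) × List (List (String × Int))
  | [] => ([], [])
  | s :: rest =>
      if pvT s < prev then ([], s :: rest)
      else
        let p := pvTake1 (pvT s) rest
        (s :: p.1, p.2)

theorem pvTake1_append (prev : Int) (l : List (List (String × Int))) :
    (pvTake1 prev l).1 ++ (pvTake1 prev l).2 = l := by
  induction l generalizing prev with
  | nil => simp [pvTake1]
  | cons s rest ih =>
      simp only [pvTake1]
      split
      · simp
      · simpa using ih (pvT s)

theorem pvTake1_snd_length (prev : Int) (l : List (List (String × Int))) :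
    (pvTake1 prev l).2.length ≤ l.length := by
  induction l generalizing prev with
  | nil => simp [pvTake1]
  | cons s rest ih =>
      simp only [pvTake1]
      split
      · simp
      · exact le_trans (ih (pvT s)) (Nat.le_succ _)

-- reference segmentation both ports are reduced to
def pvSegs : List (List (String × Int)) → List (List (List (String × Int)))
  | [] => []
  | s :: rest =>
      (s :: (pvTake1 (pvT s) rest).1) :: pvSegs (pvTake1 (pvT s) rest).2
termination_by l => l.length
decreasing_by
  exact Nat.lt_succ_of_le (pvTake1_snd_length (pvT s) rest)

-- ---- B = pvSegs ----

def pvStep (acc : List (List (List (String × Int))) × List (List (String × Int)) × Int)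
    (s : List (String × Int)) : List (List (List (String × Int))) × List (List (String × Int)) × Int :=
  let t := (PySem.Dict.mk s).getD "t" 0
  if acc.2.1 ≠ [] ∧ t < acc.2.2 then (acc.1 ++ [acc.2.1], [s], t)
  else (acc.1, acc.2.1 ++ [s], t)

def pvFin (r : List (List (List (String × Int))) × List (List (String × Int)) × Int) :
    List (List (List (String × Int))) :=
  if r.2.1 ≠ [] then r.1 ++ [r.2.1] else r.1

theorem pvB_inv (xs : List (List (String × Int)))
    (acc : List (List (List (String × Int)))) (cur : List (List (String × Int))) (prev : Int) :
    pvFin (xs.foldl pvStep (acc, cur, prev)) =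
      if cur = [] then acc ++ pvSegs xs
      else acc ++ (cur ++ (pvTake1 prev xs).1) :: pvSegs (pvTake1 prev xs).2 := by
  induction xs generalizing acc cur prev with
  | nil =>
      by_cases h : cur = [] <;> simp [h, pvSegs, pvTake1, pvFin]
  | cons s rest ih =>
      rw [List.foldl_cons]
      by_cases hc : cur = []
      · rw [show pvStep (acc, cur, prev) s = (acc, [s], pvT s) from by simp [pvStep, pvT, hc]]
        rw [ih]
        simp [hc, pvSegs]
      · by_cases ht : pvT s < prev
        · rw [show pvStep (acc, cur, prev) s = (acc ++ [cur], [s], pvT s) from by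
            simp [pvStep, pvT, hc]; exact ht]
          rw [ih]
          have hp : pvTake1 prev (s :: rest) = ([], s :: rest) := by simp [pvTake1, ht]
          simp [hc, hp, pvSegs]
        · rw [show pvStep (acc, cur, prev) s = (acc, cur ++ [s], pvT s) from by
            simp [pvStep, pvT, hc]; exact not_lt.mp ht]
          rw [ih]
          have hp : pvTake1 prev (s :: rest) =
              (s :: (pvTake1 (pvT s) rest).1, (pvTake1 (pvT s) rest).2) := by
            simp [pvTake1, ht]
          simp [hc, hp]

theorem pvB_eq_segs (strokes : List (List (String × Int))) :
    split_strokes_by_time_reset_alt strokes = pvSegs strokes := by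
  rw [show split_strokes_by_time_reset_alt strokes = pvFin (strokes.foldl pvStep ([], [], 0))
    from rfl]
  simpa using pvB_inv strokes [] [] 0

-- ---- A = pvSegs ----

def pvCuts (tv : List Int) : List Nat :=
  ((List.range (tv.length - 1)).filter
    (fun i => decide (tv.getD (i + 1) 0 < tv.getD i 0))).map (· + 1)

theorem pvCuts_cons (t t' : Int) (rest : List Int) :
    pvCuts (t :: t' :: rest) =
      (if t' < t then [1] else []) ++ (pvCuts (t' :: rest)).map (· + 1) := by
  simp only [pvCuts, List.length_cons, Nat.add_sub_cancel, List.range_succ_eq_map]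
  rw [List.filter_cons]
  simp only [List.getD_cons_succ, List.getD_cons_zero, List.filter_map, List.map_map]
  by_cases h : t' < t <;> simp [h, Function.comp_def] <;> rfl

theorem pvCuts_take1 (s : List (String × Int)) (rest : List (List (String × Int))) :
    pvCuts (List.map pvT (s :: rest)) =
      if (pvTake1 (pvT s) rest).2 = [] then []
      else (1 + (pvTake1 (pvT s) rest).1.length) ::
        (pvCuts (List.map pvT (pvTake1 (pvT s) rest).2)).map
          (· + (1 + (pvTake1 (pvT s) rest).1.length)) := by
  induction rest generalizing s with
  | nil => simp [pvCuts, pvTake1]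
  | cons s' rest' ih =>
      rw [List.map_cons, List.map_cons, pvCuts_cons, ← List.map_cons (f := pvT) (a := s') (l := rest')]
      by_cases hlt : pvT s' < pvT s
      · have hp : pvTake1 (pvT s) (s' :: rest') = ([], s' :: rest') := by
          simp [pvTake1, hlt]
        simp [hp, hlt]
      · have hp : pvTake1 (pvT s) (s' :: rest') =
            (s' :: (pvTake1 (pvT s') rest').1, (pvTake1 (pvT s') rest').2) := by
          simp [pvTake1, hlt]
        rw [ih s', hp]
        by_cases h2 : (pvTake1 (pvT s') rest').2 = []
        · simp [h2, hlt]
        · simp only [h2, hlt, if_false, List.nil_append, List.map_cons, List.map_map]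
          refine congrArg₂ List.cons (by simp [List.length_cons]; omega) ?_
          exact List.map_congr_left (fun x _ => by simp [Function.comp]; omega)

def pvChop (xs : List (List (String × Int))) (bl : List Nat) : List (List (List (String × Int))) :=
  ((bl.dropLast.zip bl.tail).filter
      (fun ab => decide ¬((xs.drop ab.1).take (ab.2 - ab.1) = []))).map
    (fun ab => (xs.drop ab.1).take (ab.2 - ab.1))

theorem pvChop_cast (xs : List (List (String × Int))) (bl : List Nat) :
    (((bl.map (fun (k : Nat) => (k : Int))).dropLast.zip (bl.map (fun (k : Nat) => (k : Int))).tail).filter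
        (fun ab => decide ¬(PySem.List.slice xs (some ab.1) (some ab.2) = []))).map
      (fun ab => PySem.List.slice xs (some ab.1) (some ab.2)) = pvChop xs bl := by
  unfold pvChop
  rw [← List.map_dropLast, ← List.map_tail, List.zip_map, List.filter_map, List.map_map]
  rw [show ((fun (ab : Int × Int) => decide ¬(PySem.List.slice xs (some ab.1) (some ab.2) = [])) ∘
        Prod.map (fun (k : Nat) => (k : Int)) (fun (k : Nat) => (k : Int))) =
      (fun (ab : Nat × Nat) => decide ¬((xs.drop ab.1).take (ab.2 - ab.1) = [])) from
    funext fun ab => by simp only [Function.comp_def, Prod.map_fst, Prod.map_snd, PySem.List.slice_natCast]]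
  rw [show ((fun (ab : Int × Int) => PySem.List.slice xs (some ab.1) (some ab.2)) ∘
        Prod.map (fun (k : Nat) => (k : Int)) (fun (k : Nat) => (k : Int))) =
      (fun (ab : Nat × Nat) => (xs.drop ab.1).take (ab.2 - ab.1)) from
    funext fun ab => by simp only [Function.comp_def, Prod.map_fst, Prod.map_snd, PySem.List.slice_natCast]]

theorem pvChop_shift (xs : List (List (String × Int))) (bl : List Nat) (j : Nat) :
    pvChop xs (bl.map (fun x => x + j)) = pvChop (xs.drop j) bl := by
  unfold pvChop
  simp only [← List.map_dropLast, ← List.map_tail, List.zip_map, List.filter_map, List.map_map,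
    Function.comp_def, Prod.map_fst, Prod.map_snd, List.drop_drop, Nat.add_sub_add_left, Nat.add_comm]
theorem pvChop_cons (xs : List (List (String × Int))) (x y : Nat) (rest : List Nat) :
    pvChop xs (x :: y :: rest) =
      (if (xs.drop x).take (y - x) = [] then [] else [(xs.drop x).take (y - x)]) ++
        pvChop xs (y :: rest) := by
  unfold pvChop
  rw [List.dropLast_cons₂, List.tail_cons, List.zip_cons_cons, List.filter_cons]
  by_cases h : (xs.drop x).take (y - x) = [] <;> simp [h]

theorem pvChop_segs (N : Nat) (strokes : List (List (String × Int))) (hN : strokes.length ≤ N) :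
    pvChop strokes ((0 : Nat) :: pvCuts (strokes.map pvT) ++ [strokes.length]) = pvSegs strokes := by
  induction N generalizing strokes with
  | zero =>
      have h0 : strokes = [] := List.length_eq_zero_iff.mp (Nat.le_zero.mp hN)
      subst h0
      simp [pvChop, pvCuts, pvSegs]
  | succ N ih =>
      match strokes with
      | [] => simp [pvChop, pvCuts, pvSegs]
      | s :: rest =>
          have hcuts := pvCuts_take1 s rest
          have happ := pvTake1_append (pvT s) rest
          set a := (pvTake1 (pvT s) rest).1 with ha
          set b := (pvTake1 (pvT s) rest).2 with hb2
          by_cases hb : b = []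
          · -- whole list is one segment
            have harest : a = rest := by simpa [hb] using happ
            rw [List.map_cons] at hcuts ⊢
            rw [hcuts, if_pos hb]
            show pvChop (s :: rest) [0, (s :: rest).length] = pvSegs (s :: rest)
            rw [pvSegs]
            rw [← ha, ← hb2, hb, harest]
            unfold pvChop
            simp [pvSegs, List.take_of_length_le]
          · rw [hcuts, if_neg hb]
            have hlen : (s :: rest).length = b.length + (1 + a.length) := by
              have := congrArg List.length happ
              simp at this
              simp [List.length_cons]
              omega
            rw [show ((0:Nat) :: ((1 + a.length) :: (pvCuts (List.map pvT b)).map (· + (1 + a.length))) ++ [(s :: rest).length]) = (0 :: (1 + a.length) :: ((pvCuts (List.map pvT b)).map (· + (1 + a.length)) ++ [(s :: rest).length])) from by simp]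
            rw [pvChop_cons]
            have htake : ((s :: rest).drop 0).take ((1 + a.length) - 0) = s :: a := by
              simp only [List.drop_zero, Nat.sub_zero]
              rw [show rest = a ++ b from happ.symm]
              rw [Nat.add_comm, List.take_succ_cons, List.take_left]
            rw [htake]
            rw [if_neg (List.cons_ne_nil s a)]
            rw [show ((1 + a.length) :: ((pvCuts (List.map pvT b)).map (· + (1 + a.length)) ++ [(s :: rest).length])) =
                ((0 :: pvCuts (List.map pvT b) ++ [b.length]).map (fun x => x + (1 + a.length))) from by
              simp [hlen, Nat.add_comm]]
            rw [pvChop_shift]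
            have hdrop : (s :: rest).drop (1 + a.length) = b := by
              rw [show rest = a ++ b from happ.symm, Nat.add_comm, List.drop_succ_cons,
                List.drop_left]
            rw [hdrop, ih b ?_]
            · rw [pvSegs, ← ha, ← hb2]
              simp
            · have h1 : b.length ≤ rest.length := pvTake1_snd_length (pvT s) rest
              have h2 : (s :: rest).length ≤ N + 1 := hN
              simp at h2
              omega

theorem pvBoundaries (strokes : List (List (String × Int))) :
    (PySem.List.pyRange 0 (PySem.List.len (strokes.map pvT) - 1) 1).foldl
      (fun bs i =>
        if PySem.List.pyGetD (strokes.map pvT) (i + 1) 0 < PySem.List.pyGetD (strokes.map pvT) i 0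
        then bs ++ [i + 1] else bs) [0] =
    (0 : Int) :: (pvCuts (strokes.map pvT)).map (fun (k : Nat) => (k : Int)) := by
  set tv := strokes.map pvT with htv
  rw [show (fun (bs : List Int) (i : Int) =>
        if PySem.List.pyGetD tv (i + 1) 0 < PySem.List.pyGetD tv i 0 then bs ++ [i + 1] else bs) =
      (fun bs i =>
        if (fun (i : Int) => decide (PySem.List.pyGetD tv (i + 1) 0 < PySem.List.pyGetD tv i 0)) i
            = true
        then bs ++ [(fun (i : Int) => i + 1) i] else bs) from by
    funext bs i; simp]
  rw [PySem.List.foldl_append_if]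
  match hs : strokes with
  | [] => simp [pvCuts, htv, PySem.List.pyRange_one_eq_nil, PySem.List.len]
  | s :: rest =>
      have hlen : PySem.List.len tv - 1 = ((rest.length : Int)) := by
        simp [htv, PySem.List.len_eq]
      rw [hlen, PySem.List.pyRange_zero_nat, List.filter_map, List.map_map]
      have hlen2 : tv.length - 1 = rest.length := by simp [htv]
      unfold pvCuts
      rw [hlen2]
      rw [show ((fun (i : Int) => decide (PySem.List.pyGetD tv (i + 1) 0 < PySem.List.pyGetD tv i 0)) ∘
            (fun (k : Nat) => (k : Int))) =
          (fun (i : Nat) => decide (tv.getD (i + 1) 0 < tv.getD i 0)) from by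
        funext k
        simp only [Function.comp_def]
        rw [show ((k : Int) + 1) = ((k + 1 : Nat) : Int) from by push_cast; ring]
        simp only [PySem.List.pyGetD_natCast, List.getD_eq_getElem?_getD]]
      rw [show ((fun (i : Int) => i + 1) ∘ (fun (k : Nat) => (k : Int))) =
          ((fun (k : Nat) => (k : Int)) ∘ (fun k => k + 1)) from by
        funext k; simp]
      simp [List.map_map]

theorem pvA_eq_chop (strokes : List (List (String × Int))) :
    split_strokes_by_time_reset strokes =
      pvChop strokes ((0 : Nat) :: pvCuts (strokes.map pvT) ++ [strokes.length]) := by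
  dsimp only [split_strokes_by_time_reset]
  rw [show (fun s => (PySem.Dict.mk s).getD "t" 0) = pvT from rfl]
  rw [pvBoundaries]
  rw [PySem.List.slice_to_neg_one, PySem.List.slice_from_one]
  rw [show (fun (segments : List (List (List (String × Int)))) (ab : Int × Int) =>
        if PySem.List.slice strokes (some ab.1) (some ab.2) ≠ [] then
          segments ++ [PySem.List.slice strokes (some ab.1) (some ab.2)] else segments) =
      (fun segments ab =>
        if (fun (ab : Int × Int) => decide ¬(PySem.List.slice strokes (some ab.1) (some ab.2) = [])) ab = true
        then segments ++ [(fun (ab : Int × Int) => PySem.List.slice strokes (some ab.1) (some ab.2)) ab]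
        else segments) from by
    funext segments ab; simp]
  rw [PySem.List.foldl_append_if, List.nil_append]
  rw [show ((0 : Int) :: (pvCuts (strokes.map pvT)).map (fun (k : Nat) => (k : Int)) ++
        [PySem.List.len strokes]) =
      (((0 : Nat) :: pvCuts (strokes.map pvT) ++ [strokes.length]).map (fun (k : Nat) => (k : Int)))
      from by simp [PySem.List.len_eq]]
  exact pvChop_cast strokes _

theorem pvA_eq_segs (strokes : List (List (String × Int))) :
    split_strokes_by_time_reset strokes = pvSegs strokes :=
  (pvA_eq_chop strokes).trans (pvChop_segs strokes.length strokes le_rfl)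

-- ===== VERDICT (by name: the statement is the Claim_ definition above) =====
theorem split_strokes_by_time_reset_spec : Claim_equal_split_strokes_by_time_reset := by
  intro strokes _
  unfold Spec_split_strokes_by_time_reset
  rw [pvA_eq_segs, pvB_eq_segs]
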